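-- pv_equiv track=rewrite | github.com/verwirrtsx/pygame | five/index.py | y_line
-- ===== SOURCE A (Python) =====
-- def y_line(who):
-- 	x_count = 0
-- 	last_x = who[-1][0]
-- 	last_y = who[-1][1]
-- 	for i in range(4):
-- 		if [last_x,last_y+(i+1)*50] in who:
-- 			x_count =x_count+1
-- 		if [last_x,last_y-(i+1)*50] in who:
-- 			x_count =x_count+1
-- 	if x_count >3:
-- 		return True
-- 	else:
-- 		return False
-- ===== SOURCE B (Python) =====
-- def y_line(who):
-- 	last_x = who[-1][0]
-- 	last_y = who[-1][1]
-- 	offs = {p[1] - last_y for p in who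
-- 	        if len(p) == 2 and p[0] == last_x and p[1] != last_y
-- 	        and (p[1] - last_y) % 50 == 0 and -200 <= p[1] - last_y <= 200}
-- 	return len(offs) > 3
-- ===== Notes on version B (the rewrite author's own statement) =====
-- stated objective: alternative
-- what changed: Replaces the 8 generated candidate points each tested with an O(n) 'in who' membership scan by a single pass over who collecting the set of valid vertical offsets from the last point (a set so duplicate points count once), answering len(offs) > 3.
import Mathlib
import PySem

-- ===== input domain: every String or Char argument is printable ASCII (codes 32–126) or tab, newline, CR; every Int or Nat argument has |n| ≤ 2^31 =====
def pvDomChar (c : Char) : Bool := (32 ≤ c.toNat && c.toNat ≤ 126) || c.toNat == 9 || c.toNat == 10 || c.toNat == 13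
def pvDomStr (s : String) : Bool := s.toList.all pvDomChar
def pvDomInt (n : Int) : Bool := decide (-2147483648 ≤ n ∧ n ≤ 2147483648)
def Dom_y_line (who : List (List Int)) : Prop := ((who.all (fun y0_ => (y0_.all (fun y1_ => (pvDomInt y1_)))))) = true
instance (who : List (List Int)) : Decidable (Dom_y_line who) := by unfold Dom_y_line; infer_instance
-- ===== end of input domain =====

-- B replaces A's 8 candidate-point membership scans by one pass collecting the set of valid
-- vertical offsets (alternative decomposition, same asymptotic cost).

-- ===== PORT A =====
-- A's for-loop over range(4), counting the two membership tests per iteration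
def y_line_count (who : List (List Int)) (last_x last_y : Int) : Int :=
  (PySem.List.pyRange 0 4 1).foldl (fun c i =>
    let c := if who.contains [last_x, last_y + (i+1)*50] then c + 1 else c
    if who.contains [last_x, last_y - (i+1)*50] then c + 1 else c) 0

-- who[-1][0] / who[-1][1]; totalized with getD defaults, exact under Pre_y_line
def y_line (who : List (List Int)) : Bool :=
  let last : List Int := (PySem.List.pyGet? who (-1)).getD []
  let last_x : Int := (PySem.List.pyGet? last 0).getD 0
  let last_y : Int := (PySem.List.pyGet? last 1).getD 0
  if y_line_count who last_x last_y > 3 then true else false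

-- ===== PORT B =====
-- the set comprehension of Source B: one pass over who collecting valid offsets
def y_line_offs (who : List (List Int)) (last_x last_y : Int) : PySem.Set Int :=
  PySem.Set.ofList (who.filterMap (fun p =>
    match p with
    | [a, b] =>
        if a = last_x ∧ b ≠ last_y ∧ PySem.Int.mod (b - last_y) 50 = 0 ∧
           -200 ≤ b - last_y ∧ b - last_y ≤ 200
        then some (b - last_y) else none
    | _ => none))

def y_line_alt (who : List (List Int)) : Bool :=
  let last : List Int := (PySem.List.pyGet? who (-1)).getD []
  let last_x : Int := (PySem.List.pyGet? last 0).getD 0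
  let last_y : Int := (PySem.List.pyGet? last 1).getD 0
  decide (PySem.Set.len (y_line_offs who last_x last_y) > 3)

-- ===== PRECONDITION & SPEC =====
-- excludes exactly the inputs where Python A raises IndexError: empty who, or who[-1] shorter than 2
def Pre_y_line (who : List (List Int)) : Prop :=
  who ≠ [] ∧ 2 ≤ ((who.getLast?).getD []).length
instance (who : List (List Int)) : Decidable (Pre_y_line who) := by unfold Pre_y_line; infer_instance
def pvWitness_y_line : List (List Int) := [[0, 50], [0, -50], [0, 100], [0, 150], [0, 0]]

def Spec_y_line (who : List (List Int)) (out : Bool) : Prop := out = y_line_alt who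
instance (who : List (List Int)) (out : Bool) : Decidable (Spec_y_line who out) := by unfold Spec_y_line; infer_instance

-- ===== CLAIM (what is proved, stated in full; the proofs are below) =====
def Claim_equal_y_line : Prop := ∀ (who : List (List Int)), Dom_y_line who → Pre_y_line who → Spec_y_line who (y_line who)

-- ===== LEMMAS AND PROOFS =====

-- the 8 offsets A probes, in A's probe order
def Koff : List Int := [50, -50, 100, -100, 150, -150, 200, -200]

theorem mem_Koff_iff (d : Int) :
    d ∈ Koff ↔ d ≠ 0 ∧ d % 50 = 0 ∧ -200 ≤ d ∧ d ≤ 200 := by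
  simp [Koff]
  omega

theorem foldl_count (g : Int → Bool) (ks : List Int) (c : Int) :
    ks.foldl (fun c k => if g k then c + 1 else c) c
    = c + ((ks.filter g).length : Int) := by
  induction ks generalizing c with
  | nil => simp
  | cons k ks ih =>
    simp only [List.foldl_cons, List.filter_cons, ih]
    split_ifs <;> simp <;> try omega

theorem count_eq (who : List (List Int)) (lx ly : Int) :
    y_line_count who lx ly
    = ((Koff.filter (fun k => who.contains [lx, ly + k])).length : Int) := by
  have h : PySem.List.pyRange 0 4 1 = [0, 1, 2, 3] := by decide
  calc y_line_count who lx ly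
      = Koff.foldl (fun c k => if who.contains [lx, ly + k] then c + 1 else c) 0 := by
        unfold y_line_count
        rw [h]
        simp only [List.foldl, Koff]
        norm_num [sub_eq_add_neg]
    _ = ((Koff.filter (fun k => who.contains [lx, ly + k])).length : Int) := by
        rw [foldl_count]
        simp

theorem mem_offs_iff (who : List (List Int)) (lx ly d : Int) :
    d ∈ y_line_offs who lx ly ↔ ([lx, ly + d] ∈ who ∧ d ∈ Koff) := by
  unfold y_line_offs
  rw [PySem.Set.mem_ofList, List.mem_filterMap]
  constructor
  · rintro ⟨p, hp, hsome⟩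
    match p with
    | [] => simp at hsome
    | [_] => simp at hsome
    | _ :: _ :: _ :: _ => simp at hsome
    | [a, b] =>
      simp at hsome
      obtain ⟨⟨ha, hb, hdvd, h1, h2⟩, hd⟩ := hsome
      subst ha
      have hbd : b = ly + d := by omega
      subst hbd
      exact ⟨hp, by rw [mem_Koff_iff]; omega⟩
  · rintro ⟨hmem, hK⟩
    rw [mem_Koff_iff] at hK
    refine ⟨[lx, ly + d], hmem, ?_⟩
    simp
    omega

theorem len_offs_eq (who : List (List Int)) (lx ly : Int) :
    PySem.Set.len (y_line_offs who lx ly)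
    = ((Koff.filter (fun k => who.contains [lx, ly + k])).length : Int) := by
  have hperm : (y_line_offs who lx ly).Perm
      (Koff.filter (fun k => who.contains [lx, ly + k])) := by
    rw [List.perm_ext_iff_of_nodup
        (by unfold y_line_offs; exact PySem.Set.nodup_ofList _)
        (List.Nodup.filter _ (by decide : Koff.Nodup))]
    intro d
    rw [mem_offs_iff, List.mem_filter]
    simp [and_comm]
  have := hperm.length_eq
  unfold PySem.Set.len
  exact_mod_cast this

theorem y_line_eq_alt (who : List (List Int)) : y_line who = y_line_alt who := by
  simp only [y_line, y_line_alt, count_eq, len_offs_eq]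
  split_ifs with hc
  · symm
    rw [decide_eq_true_eq]
    exact_mod_cast hc
  · symm
    rw [decide_eq_false_iff_not]
    intro h
    exact hc (by exact_mod_cast h)

-- ===== VERDICT (by name: the statement is the Claim_ definition above) =====
theorem y_line_spec : Claim_equal_y_line := by
  intro who _ _
  unfold Spec_y_line
  exact y_line_eq_alt who
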